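-- pv_equiv track=rewrite | github.com/Atous-Technology-Systems/network | atous_sec_network/security/nnis_system.py | _are_indicators_semantically_similar
-- ===== SOURCE A (Python) =====
-- def _are_indicators_semantically_similar(indicator1: str, indicator2: str) -> bool:
--     """
--     Verifica se dois indicadores são semanticamente similares
--
--     Args:
--         indicator1: Primeiro indicador
--         indicator2: Segundo indicador
--
--     Returns:
--         True se semanticamente similares
--     """
--     # Normalizar para comparação
--     ind1_lower = indicator1.lower()
--     ind2_lower = indicator2.lower()
--
--     # Verificar se um contém o outro
--     if ind1_lower in ind2_lower or ind2_lower in ind1_lower: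
--         return True
--
--     # Verificar palavras-chave similares
--     semantic_groups = {
--         "file": ["file", "exe", "dll", "process"],
--         "registry": ["registry", "reg", "hkey", "software"],
--         "network": ["network", "beacon", "c2", "traffic", "connection"],
--         "malware": ["malware", "suspicious", "malicious", "trojan"],
--         "ddos": ["ddos", "flood", "packet", "attack"],
--         "injection": ["injection", "sql", "xss", "command"]
--     }
--
--     for group_name, keywords in semantic_groups.items():
--         if any(keyword in ind1_lower for keyword in keywords) and any(keyword in ind2_lower for keyword in keywords):
--             return True
--
--     return False
-- ===== SOURCE B (Python) =====
-- def _are_indicators_semantically_similar(indicator1: str, indicator2: str) -> bool: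
--     i1 = indicator1.lower()
--     i2 = indicator2.lower()
--     if i1 in i2 or i2 in i1:
--         return True
--     # Inverted index: keyword -> group name (keywords are unique across groups).
--     kw2group = {
--         "file": "file", "exe": "file", "dll": "file", "process": "file",
--         "registry": "registry", "reg": "registry", "hkey": "registry", "software": "registry",
--         "network": "network", "beacon": "network", "c2": "network", "traffic": "network",
--         "connection": "network",
--         "malware": "malware", "suspicious": "malware", "malicious": "malware", "trojan": "malware",
--         "ddos": "ddos", "flood": "ddos", "packet": "ddos", "attack": "ddos",
--         "injection": "injection", "sql": "injection", "xss": "injection", "command": "injection",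
--     }
--     lengths = {len(k) for k in kw2group}
--
--     def matched(s):
--         # Enumerate the substrings of s whose length is a keyword length and
--         # look each one up in the inverted index, collecting the group names hit.
--         return {kw2group[s[i:i + L]]
--                 for L in lengths
--                 for i in range(len(s) - L + 1)
--                 if s[i:i + L] in kw2group}
--
--     return not matched(i1).isdisjoint(matched(i2))
-- ===== Notes on version B (the rewrite author's own statement) =====
-- stated objective: alternative
-- what changed: Replaces A's loop over semantic groups that searches every keyword in both strings by an inverted index: a keyword-to-group dictionary plus the set of keyword lengths, against which each string's substrings of those lengths are looked up, collecting matched group names per string and intersecting the two sets.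
import Mathlib
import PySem

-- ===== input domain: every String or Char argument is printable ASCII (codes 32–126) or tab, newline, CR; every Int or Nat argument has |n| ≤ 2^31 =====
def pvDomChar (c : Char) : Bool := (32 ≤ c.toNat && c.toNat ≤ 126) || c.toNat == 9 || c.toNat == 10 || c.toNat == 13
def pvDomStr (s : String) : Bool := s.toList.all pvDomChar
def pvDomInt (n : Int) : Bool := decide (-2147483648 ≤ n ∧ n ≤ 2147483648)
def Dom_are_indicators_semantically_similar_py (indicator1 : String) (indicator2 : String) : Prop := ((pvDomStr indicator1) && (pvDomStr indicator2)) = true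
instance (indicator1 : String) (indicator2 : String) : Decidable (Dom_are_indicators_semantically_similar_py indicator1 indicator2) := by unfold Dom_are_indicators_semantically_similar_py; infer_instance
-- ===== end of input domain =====

-- B replaces A's per-group keyword searches by an inverted keyword->group index queried
-- with each string's substrings of the keyword lengths; objective: alternative algorithm.

-- ===== PORT A =====
def pvGroupsA : List (String × List String) :=
  [("file", ["file", "exe", "dll", "process"]),
   ("registry", ["registry", "reg", "hkey", "software"]),
   ("network", ["network", "beacon", "c2", "traffic", "connection"]),
   ("malware", ["malware", "suspicious", "malicious", "trojan"]),
   ("ddos", ["ddos", "flood", "packet", "attack"]),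
   ("injection", ["injection", "sql", "xss", "command"])]

def are_indicators_semantically_similar_py (indicator1 : String) (indicator2 : String) : Bool :=
  let ind1_lower := PySem.Str.lower indicator1
  let ind2_lower := PySem.Str.lower indicator2
  if PySem.Str.isIn ind1_lower ind2_lower || PySem.Str.isIn ind2_lower ind1_lower then
    true
  else
    -- the for-loop with 'return True' on the first hit = any over the dict items
    pvGroupsA.any (fun p =>
      p.2.any (fun keyword => PySem.Str.isIn keyword ind1_lower) &&
      p.2.any (fun keyword => PySem.Str.isIn keyword ind2_lower))

-- ===== PORT B =====
def pvKwPairs : List (String × String) :=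
  [("file", "file"), ("exe", "file"), ("dll", "file"), ("process", "file"),
   ("registry", "registry"), ("reg", "registry"), ("hkey", "registry"), ("software", "registry"),
   ("network", "network"), ("beacon", "network"), ("c2", "network"), ("traffic", "network"),
   ("connection", "network"),
   ("malware", "malware"), ("suspicious", "malware"), ("malicious", "malware"), ("trojan", "malware"),
   ("ddos", "ddos"), ("flood", "ddos"), ("packet", "ddos"), ("attack", "ddos"),
   ("injection", "injection"), ("sql", "injection"), ("xss", "injection"), ("command", "injection")]

def pvKw2Group : PySem.Dict String String := PySem.Dict.ofList pvKwPairs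

-- {len(k) for k in kw2group}
def pvLengths : PySem.Set Int :=
  PySem.Set.ofList ((PySem.Dict.keys pvKw2Group).map (fun k => PySem.Str.len k))

-- {kw2group[s[i:i+L]] for L in lengths for i in range(len(s)-L+1) if s[i:i+L] in kw2group}
-- ('if sub in kw2group: kw2group[sub]' is rendered as filterMap over Dict.get?)
def pvMatched (s : String) : PySem.Set String :=
  PySem.Set.ofList (pvLengths.flatMap (fun L =>
    (PySem.List.pyRange 0 (PySem.Str.len s - L + 1) 1).filterMap (fun i =>
      PySem.Dict.get? pvKw2Group (PySem.Str.slice s (some i) (some (i + L))))))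

def are_indicators_semantically_similar_py_alt (indicator1 : String) (indicator2 : String) : Bool :=
  let i1 := PySem.Str.lower indicator1
  let i2 := PySem.Str.lower indicator2
  if PySem.Str.isIn i1 i2 || PySem.Str.isIn i2 i1 then
    true
  else
    !(PySem.Set.isdisjoint (pvMatched i1) (pvMatched i2))

-- ===== PRECONDITION & SPEC =====
def Spec_are_indicators_semantically_similar_py (indicator1 : String) (indicator2 : String) (out : Bool) : Prop := out = are_indicators_semantically_similar_py_alt indicator1 indicator2
instance (indicator1 : String) (indicator2 : String) (out : Bool) : Decidable (Spec_are_indicators_semantically_similar_py indicator1 indicator2 out) := by unfold Spec_are_indicators_semantically_similar_py; infer_instance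

-- ===== CLAIM (what is proved, stated in full; the proofs are below) =====
def Claim_equal_are_indicators_semantically_similar_py : Prop := ∀ (indicator1 : String) (indicator2 : String), Dom_are_indicators_semantically_similar_py indicator1 indicator2 → Spec_are_indicators_semantically_similar_py indicator1 indicator2 (are_indicators_semantically_similar_py indicator1 indicator2)

-- ===== LEMMAS AND PROOFS =====

-- the inverted index is exactly the pair list (keywords are distinct)
lemma pv_items : pvKw2Group.items = pvKwPairs := by decide

-- every keyword's length is in the length set, its lookup succeeds, and it is nonempty
lemma pv_len_mem : ∀ p ∈ pvKwPairs, PySem.Str.len p.1 ∈ pvLengths := by decide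

lemma pv_get : ∀ p ∈ pvKwPairs, pvKw2Group.get? p.1 = some p.2 := by decide

lemma pv_key_pos : ∀ p ∈ pvKwPairs, 0 < p.1.toList.length := by decide

-- group table ↔ pair list
lemma pv_pairs_of_group : ∀ p ∈ pvGroupsA, ∀ kw ∈ p.2, (kw, p.1) ∈ pvKwPairs := by decide

lemma pv_group_of_pair : ∀ q ∈ pvKwPairs, ∃ p, p ∈ pvGroupsA ∧ q.2 = p.1 ∧ q.1 ∈ p.2 := by decide

lemma pv_groups_fst_inj : ∀ p ∈ pvGroupsA, ∀ q ∈ pvGroupsA, p.1 = q.1 → p = q := by decide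

-- membership in B's matched-group set = some keyword of that group occurs in s
lemma pv_lengths_pos : ∀ L ∈ pvLengths, 0 < L := by decide

lemma pv_mem_matched (s : String) (g : String) :
    g ∈ pvMatched s ↔ ∃ kw, (kw, g) ∈ pvKwPairs ∧ PySem.Str.isIn kw s = true := by
  unfold pvMatched
  rw [PySem.Set.mem_ofList, List.mem_flatMap]
  constructor
  · rintro ⟨L, hL, hg⟩
    rw [List.mem_filterMap] at hg
    obtain ⟨i, hi, hget⟩ := hg
    have hmem := PySem.Dict.mem_items_of_get?_eq_some _ hget
    rw [pv_items] at hmem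
    refine ⟨_, hmem, ?_⟩
    -- the slice is a prefix of a suffix of s, hence a substring
    rw [PySem.List.mem_pyRange_one] at hi
    have h0L : 0 < L := pv_lengths_pos L hL
    have hsl : (PySem.Str.slice s (some i) (some (i + L))).toList =
        (s.toList.drop i.toNat).take ((i + L).toNat - i.toNat) := by
      simp only [PySem.Str.toList_slice, PySem.Chars.slice_eq_listSlice]
      exact PySem.List.slice_toNat _ hi.1 (by omega)
    rw [show PySem.Str.isIn (PySem.Str.slice s (some i) (some (i + L))) s =
        PySem.Chars.isIn (PySem.Str.slice s (some i) (some (i + L))).toList s.toList by simp]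
    rw [← PySem.Chars.exists_prefix_drop_iff_isIn]
    exact ⟨i.toNat, by rw [hsl]; exact List.take_prefix _ _⟩
  · rintro ⟨kw, hmem, hin⟩
    have hLmem : PySem.Str.len kw ∈ pvLengths := pv_len_mem _ hmem
    have hkwpos : 0 < kw.toList.length := pv_key_pos _ hmem
    have hlen : PySem.Str.len kw = (kw.toList.length : Int) := by simp
    rw [show PySem.Str.isIn kw s = PySem.Chars.isIn kw.toList s.toList by simp,
        ← PySem.Chars.exists_prefix_drop_iff_isIn] at hin
    obtain ⟨j, hpre⟩ := hin
    have hjb : j + kw.toList.length ≤ s.toList.length := by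
      have := hpre.length_le
      rw [List.length_drop] at this
      omega
    refine ⟨PySem.Str.len kw, hLmem, ?_⟩
    rw [List.mem_filterMap]
    refine ⟨(j : Int), ?_, ?_⟩
    · rw [PySem.List.mem_pyRange_one]
      have hlens : PySem.Str.len s = (s.toList.length : Int) := by simp
      rw [hlen, hlens]
      constructor
      · positivity
      · omega
    · have hsl : (PySem.Str.slice s (some (j : Int)) (some ((j : Int) + PySem.Str.len kw))).toList
          = kw.toList := by
        simp only [PySem.Str.toList_slice, PySem.Chars.slice_eq_listSlice, hlen]
        rw [PySem.List.slice_natCast_add]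
        exact (List.prefix_iff_eq_take.mp hpre).symm
      rw [String.toList_inj.mp hsl]
      exact pv_get _ hmem

-- A's any-over-groups equals B's non-disjointness of the matched sets
lemma pv_main (i1 i2 : String) :
    pvGroupsA.any (fun p =>
      p.2.any (fun kw => PySem.Str.isIn kw i1) && p.2.any (fun kw => PySem.Str.isIn kw i2)) =
    !(PySem.Set.isdisjoint (pvMatched i1) (pvMatched i2)) := by
  apply Bool.coe_iff_coe.mp
  rw [Bool.not_eq_true', ← Bool.not_eq_true]
  simp only [List.any_eq_true, Bool.and_eq_true]
  constructor
  · rintro ⟨p, hp, ⟨kw1, hkw1, h1⟩, ⟨kw2, hkw2, h2⟩⟩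
    intro hd
    rw [PySem.Set.isdisjoint_iff] at hd
    exact hd p.1 ((pv_mem_matched i1 p.1).mpr ⟨kw1, pv_pairs_of_group p hp kw1 hkw1, h1⟩)
      ((pv_mem_matched i2 p.1).mpr ⟨kw2, pv_pairs_of_group p hp kw2 hkw2, h2⟩)
  · intro hd
    have hex : ¬ ∀ x ∈ pvMatched i1, x ∉ pvMatched i2 := by
      intro hall; exact hd ((PySem.Set.isdisjoint_iff _ _).mpr hall)
    push Not at hex
    obtain ⟨g, hg1, hg2⟩ := hex
    obtain ⟨kw1, hp1, hin1⟩ := (pv_mem_matched i1 g).mp hg1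
    obtain ⟨kw2, hp2, hin2⟩ := (pv_mem_matched i2 g).mp hg2
    obtain ⟨p, hp, hg1', hkw1⟩ := pv_group_of_pair _ hp1
    obtain ⟨q, hq, hg2', hkw2⟩ := pv_group_of_pair _ hp2
    have hpq : p = q := pv_groups_fst_inj p hp q hq (by rw [← hg1', ← hg2'])
    exact ⟨p, hp, ⟨kw1, hkw1, hin1⟩, ⟨kw2, hpq ▸ hkw2, hin2⟩⟩

-- ===== VERDICT (by name: the statement is the Claim_ definition above) =====
theorem are_indicators_semantically_similar_py_spec : Claim_equal_are_indicators_semantically_similar_py := by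
  intro indicator1 indicator2 _
  unfold Spec_are_indicators_semantically_similar_py
  unfold are_indicators_semantically_similar_py are_indicators_semantically_similar_py_alt
  dsimp only
  split
  · rfl
  · exact pv_main _ _
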